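-- pv_equiv track=rewrite | github.com/Mastermindmani88897/Coding_platforms | Difficulty: Easy/Print Diagonally/print-diagonally.py | diagView
-- ===== SOURCE A (Python) =====
-- def diagView(mat):
--     n = len(mat)
--     res = []
--
--     for d in range(2 * n - 1):
--         if d < n:
--             i, j = 0, d
--         else:
--             i, j = d - n + 1, n - 1
--
--         while i < n and j >= 0:
--             res.append(mat[i][j])
--             i += 1
--             j -= 1
--
--     return res
-- ===== SOURCE B (Python) =====
-- def diagView(mat):
--     n = len(mat)
--     buckets = [[] for _ in range(2 * n - 1)]
--     for i in range(n):
--         for j in range(n):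
--             buckets[i + j].append(mat[i][j])
--     out = []
--     for b in buckets:
--         out += b
--     return out
-- ===== Notes on version B (the rewrite author's own statement) =====
-- stated objective: alternative
-- what changed: Instead of walking each anti-diagonal with a start-point computation and an inner while loop, B makes one row-major pass that drops every cell mat[i][j] into bucket i+j and then concatenates the 2n-1 buckets in order; Pre_ excludes ragged matrices (a row shorter than the matrix height), on which A raises IndexError (and B raises IndexError too).
import Mathlib
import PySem

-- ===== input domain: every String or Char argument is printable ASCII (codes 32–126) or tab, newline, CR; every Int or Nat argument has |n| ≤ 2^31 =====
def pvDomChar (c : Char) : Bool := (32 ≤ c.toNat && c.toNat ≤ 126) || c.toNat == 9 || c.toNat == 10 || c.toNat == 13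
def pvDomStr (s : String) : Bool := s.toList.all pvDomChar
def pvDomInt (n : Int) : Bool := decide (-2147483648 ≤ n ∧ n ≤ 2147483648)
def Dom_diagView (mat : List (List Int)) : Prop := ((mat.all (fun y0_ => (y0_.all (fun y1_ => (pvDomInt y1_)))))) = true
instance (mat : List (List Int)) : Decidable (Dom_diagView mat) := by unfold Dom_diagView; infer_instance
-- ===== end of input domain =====

-- B groups the cells into anti-diagonal buckets in one row-major pass instead of
-- walking each diagonal with a while loop (objective: alternative; same O(n^2) cost).

-- ===== PORT A =====
-- the inner `while i < n and j >= 0` loop of A; fuel bounds the iteration count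
def pvAWhile (mat : List (List Int)) (n : Int) : Nat → Int → Int → List Int → List Int
  | 0, _, _, acc => acc
  | fuel+1, i, j, acc =>
    if i < n ∧ 0 ≤ j then
      match PySem.List.pyGet? mat i with
      | none => acc  -- Python raises IndexError here (excluded by Pre_)
      | some row =>
        match PySem.List.pyGet? row j with
        | none => acc  -- Python raises IndexError here (excluded by Pre_)
        | some v => pvAWhile mat n fuel (i+1) (j-1) (acc ++ [v])
    else acc

def diagView (mat : List (List Int)) : List Int :=
  -- n = len(mat) is written out as (mat.length : Int)
  (PySem.List.pyRange 0 (2*(mat.length : Int)-1) 1).foldl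
    (fun res d =>
      pvAWhile mat (mat.length : Int) (mat.length : Int).toNat
        (if d < (mat.length : Int) then ((0 : Int), d) else (d - mat.length + 1, (mat.length : Int) - 1)).1
        (if d < (mat.length : Int) then ((0 : Int), d) else (d - mat.length + 1, (mat.length : Int) - 1)).2
        res) []

-- ===== PORT B =====
def diagView_alt (mat : List (List Int)) : List Int :=
  -- buckets[i+j].append(mat[i][j]) over a single row-major pass, then concatenate
  (((List.range mat.length).foldl (fun bs i =>
      (List.range mat.length).foldl (fun bs j =>
         bs.modify (i+j) (fun b => b ++ [(mat.getD i []).getD j 0])) bs)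
    (List.replicate (2*mat.length-1) ([] : List Int))).foldl (fun out b => out ++ b) [])

-- ===== PRECONDITION & SPEC =====
-- Pre_ excludes exactly the ragged matrices (some row shorter than the matrix height),
-- on which Python A raises IndexError (and B raises IndexError too).
def Pre_diagView (mat : List (List Int)) : Prop := ∀ row ∈ mat, mat.length ≤ row.length
instance (mat : List (List Int)) : Decidable (Pre_diagView mat) := by unfold Pre_diagView; infer_instance
def pvWitness_diagView : List (List Int) := [[1,2],[3,4]]

def Spec_diagView (mat : List (List Int)) (out : List Int) : Prop := out = diagView_alt mat
instance (mat : List (List Int)) (out : List Int) : Decidable (Spec_diagView mat out) := by unfold Spec_diagView; infer_instance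

-- ===== CLAIM (what is proved, stated in full; the proofs are below) =====
def Claim_equal_diagView : Prop := ∀ (mat : List (List Int)), Dom_diagView mat → Pre_diagView mat → Spec_diagView mat (diagView mat)

-- ===== LEMMAS AND PROOFS =====

-- the cells of anti-diagonal d contributed by row i (at most one)
def pvF (mat : List (List Int)) (d i : Nat) : List Int :=
  if i ≤ d ∧ d < i + mat.length then [(mat.getD i []).getD (d - i) 0] else []

-- anti-diagonal d, top to bottom
def pvG (mat : List (List Int)) (d : Nat) : List Int :=
  (List.range mat.length).flatMap (pvF mat d)

theorem pvG_spec : ∀ mat d, pvG mat d = (List.range mat.length).flatMap (pvF mat d) := by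
  intro mat d; rfl

-- ---- B side ----

theorem pv_inner (mat : List (List Int)) (i d : Nat) :
    ∀ (m : Nat) (bs : List (List Int)),
      ((List.range m).foldl (fun bs j =>
         bs.modify (i+j) (fun b => b ++ [(mat.getD i []).getD j 0])) bs)[d]?
      = bs[d]?.map (fun b => b ++ (if i ≤ d ∧ d < i + m then [(mat.getD i []).getD (d - i) 0] else [])) := by
  intro m
  induction m with
  | zero =>
      intro bs
      cases h : bs[d]? <;> simp [h]
  | succ m ih =>
      intro bs
      rw [List.range_succ, List.foldl_append]
      simp only [List.foldl_cons, List.foldl_nil]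
      rw [List.getElem?_modify, ih bs]
      cases h : bs[d]? with
      | none => simp
      | some b =>
          simp only [Option.map_some]
          by_cases hdi : i + m = d
          · have h2 : i ≤ d ∧ d < i + (m+1) := by omega
            have h3 : d - i = m := by omega
            simp [hdi, h3]; exact h2
          · by_cases h5 : i ≤ d ∧ d < i + m
            · have h6 : i ≤ d ∧ d < i + (m+1) := by omega
              simp [hdi, h5, h6]
            · have h6 : ¬ (i ≤ d ∧ d < i + (m+1)) := by omega
              simp [hdi, h5, h6]

theorem pv_outer (mat : List (List Int)) (d : Nat) :
    ∀ (m : Nat) (bs : List (List Int)),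
      ((List.range m).foldl (fun bs i =>
         (List.range mat.length).foldl (fun bs j =>
            bs.modify (i+j) (fun b => b ++ [(mat.getD i []).getD j 0])) bs) bs)[d]?
      = bs[d]?.map (fun b => b ++ (List.range m).flatMap (pvF mat d)) := by
  intro m
  induction m with
  | zero =>
      intro bs; cases h : bs[d]? <;> simp [h]
  | succ m ih =>
      intro bs
      rw [List.range_succ, List.foldl_append]
      simp only [List.foldl_cons, List.foldl_nil]
      rw [pv_inner mat m d mat.length, ih bs]
      cases h : bs[d]? with
      | none => simp
      | some b =>
          simp [pvF, List.append_assoc]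

theorem pv_buckets (mat : List (List Int)) :
    ((List.range mat.length).foldl (fun bs i =>
       (List.range mat.length).foldl (fun bs j =>
          bs.modify (i+j) (fun b => b ++ [(mat.getD i []).getD j 0])) bs)
      (List.replicate (2*mat.length-1) ([] : List Int)))
    = (List.range (2*mat.length-1)).map (pvG mat) := by
  apply List.ext_getElem?
  intro d
  rw [pv_outer]
  by_cases hd : d < 2*mat.length-1
  · rw [List.getElem?_replicate, if_pos hd, List.getElem?_map, List.getElem?_range hd]
    simp [pvG]
  · have h1 : (List.replicate (2*mat.length-1) ([] : List Int))[d]? = none := by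
      rw [List.getElem?_eq_none]; simp; omega
    have h2 : ((List.range (2*mat.length-1)).map (pvG mat))[d]? = none := by
      rw [List.getElem?_eq_none]; simp; omega
    rw [h1, h2]; rfl

theorem pv_foldl_append (bs : List (List Int)) :
    ∀ acc, bs.foldl (fun out b => out ++ b) acc = acc ++ bs.flatten := by
  induction bs with
  | nil => intro acc; simp
  | cons b bs ih => intro acc; simp [ih, List.append_assoc]

theorem pv_alt_canon (mat : List (List Int)) :
    diagView_alt mat = (List.range (2*mat.length-1)).flatMap (pvG mat) := by
  unfold diagView_alt
  rw [pv_buckets, pv_foldl_append]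
  simp [List.flatMap]

-- ---- A side ----

theorem pv_while (mat : List (List Int)) (hpre : Pre_diagView mat) (d : Nat) :
    ∀ (fuel k : Nat) (acc : List Int),
      k ≤ mat.length → d < k + mat.length → mat.length - k ≤ fuel →
      pvAWhile mat mat.length fuel (k : Int) ((d : Int) - (k : Int)) acc
        = acc ++ (List.range' k (mat.length - k)).flatMap (pvF mat d) := by
  intro fuel
  induction fuel with
  | zero =>
      intro k acc hk hd hf
      have : mat.length - k = 0 := by omega
      simp [pvAWhile, this]
  | succ fuel ih =>
      intro k acc hk hd hf
      by_cases hkn : k < mat.length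
      · by_cases hkd : k ≤ d
        · have hcond : (k : Int) < (mat.length : Int) ∧ (0:Int) ≤ (d : Int) - (k : Int) := by
            constructor <;> [exact_mod_cast hkn; omega]
          have hrow : PySem.List.pyGet? mat (k : Int) = some (mat.getD k []) := by
            rw [PySem.List.pyGet?_natCast]
            rw [List.getElem?_eq_getElem hkn]
            rw [List.getD_eq_getElem _ _ hkn]
          have hrlen : mat.length ≤ (mat.getD k []).length := by
            apply hpre
            rw [List.getD_eq_getElem _ _ hkn]
            exact List.getElem_mem hkn
          have hjn : d - k < (mat.getD k []).length := by omega
          have hcast : (d : Int) - (k : Int) = ((d - k : Nat) : Int) := by omega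
          have hval : PySem.List.pyGet? (mat.getD k []) ((d : Int) - (k : Int))
              = some ((mat.getD k []).getD (d - k) 0) := by
            rw [hcast, PySem.List.pyGet?_natCast]
            rw [List.getElem?_eq_getElem hjn]
            rw [List.getD_eq_getElem _ _ hjn]
          rw [pvAWhile, if_pos hcond, hrow]
          simp only [hval]
          have hstep1 : (k : Int) + 1 = ((k+1 : Nat) : Int) := by push_cast; ring
          have hstep2 : (d : Int) - (k : Int) - 1 = (d : Int) - ((k+1 : Nat) : Int) := by
            push_cast; ring
          rw [hstep1, hstep2, ih (k+1) _ (by omega) (by omega) (by omega)]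
          have hrange : List.range' k (mat.length - k)
              = k :: List.range' (k+1) (mat.length - (k+1)) := by
            have : mat.length - k = (mat.length - (k+1)) + 1 := by omega
            rw [this, List.range'_succ]
          rw [hrange]
          have hF : pvF mat d k = [(mat.getD k []).getD (d - k) 0] := by
            unfold pvF; rw [if_pos ⟨hkd, by omega⟩]
          simp [hF, List.append_assoc]
        · have hcond : ¬ ((k : Int) < (mat.length : Int) ∧ (0:Int) ≤ (d : Int) - (k : Int)) := by
            intro ⟨_, h2⟩; omega
          rw [pvAWhile, if_neg hcond]
          have : (List.range' k (mat.length - k)).flatMap (pvF mat d) = [] := by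
            rw [List.flatMap_eq_nil_iff]
            intro i hi
            rw [List.mem_range'_1] at hi
            unfold pvF
            rw [if_neg (by omega)]
          rw [this, List.append_nil]
      · have hklen : k = mat.length := by omega
        have hcond : ¬ ((k : Int) < (mat.length : Int) ∧ (0:Int) ≤ (d : Int) - (k : Int)) := by
          intro ⟨h1, _⟩; omega
        rw [pvAWhile, if_neg hcond]
        have : mat.length - k = 0 := by omega
        simp [this]

-- one whole diagonal step of A equals appending anti-diagonal d
theorem pv_diag_step (mat : List (List Int)) (hpre : Pre_diagView mat)
    (d : Nat) (hd : d < 2*mat.length-1) (acc : List Int) :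
    pvAWhile mat (mat.length : Int) ((mat.length : Int)).toNat
      (if (d : Int) < (mat.length : Int) then ((0 : Int), (d : Int))
        else ((d : Int) - mat.length + 1, (mat.length : Int) - 1)).1
      (if (d : Int) < (mat.length : Int) then ((0 : Int), (d : Int))
        else ((d : Int) - mat.length + 1, (mat.length : Int) - 1)).2
      acc
    = acc ++ pvG mat d := by
  have hfuel : ((mat.length : Int)).toNat = mat.length := Int.toNat_natCast _
  by_cases h : (d : Int) < (mat.length : Int)
  · have hdn : d < mat.length := by exact_mod_cast h
    rw [if_pos h, hfuel]
    have hW := pv_while mat hpre d mat.length 0 acc (by omega) (by omega) (by omega)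
    simp only [Nat.cast_zero, sub_zero, Nat.sub_zero] at hW
    show pvAWhile mat (mat.length : Int) mat.length 0 (d : Int) acc = acc ++ pvG mat d
    rw [hW, pvG_spec, List.range_eq_range']
  · have hdn : mat.length ≤ d := by exact_mod_cast not_lt.mp h
    rw [if_neg h, hfuel]
    show pvAWhile mat (mat.length : Int) mat.length
      ((d : Int) - mat.length + 1) ((mat.length : Int) - 1) acc = acc ++ pvG mat d
    have hc1 : (d : Int) - mat.length + 1 = ((d + 1 - mat.length : Nat) : Int) := by omega
    have hc2 : (mat.length : Int) - 1 = (d : Int) - ((d + 1 - mat.length : Nat) : Int) := by omega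
    rw [hc1, hc2,
        pv_while mat hpre d mat.length (d + 1 - mat.length) acc (by omega) (by omega) (by omega)]
    congr 1
    rw [pvG_spec, List.range_eq_range']
    have hsplit : List.range' 0 mat.length
        = List.range' 0 (d + 1 - mat.length) ++ List.range' (d + 1 - mat.length) (mat.length - (d + 1 - mat.length)) := by
      have := @List.range'_append 0 (d + 1 - mat.length) (mat.length - (d + 1 - mat.length)) 1
      simp only [one_mul, zero_add] at this
      rw [this]
      congr 1
      omega
    rw [hsplit, List.flatMap_append]
    have hnil : (List.range' 0 (d + 1 - mat.length)).flatMap (pvF mat d) = [] := by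
      rw [List.flatMap_eq_nil_iff]
      intro i hi
      rw [List.mem_range'_1] at hi
      unfold pvF
      rw [if_neg (by omega)]
    rw [hnil, List.nil_append]

theorem pv_foldl_flatMap {α : Type} (f : Nat → List α) :
    ∀ (l : List Nat) (step : List α → Nat → List α) (acc : List α),
      (∀ acc' d, d ∈ l → step acc' d = acc' ++ f d) →
      l.foldl step acc = acc ++ l.flatMap f := by
  intro l
  induction l with
  | nil => intro step acc _; simp
  | cons d l ih =>
      intro step acc hstep
      rw [List.foldl_cons, hstep acc d (by simp),
          ih step _ (fun a d' hd' => hstep a d' (by simp [hd'])),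
          List.flatMap_cons, List.append_assoc]

theorem pv_a_canon (mat : List (List Int)) (hpre : Pre_diagView mat) :
    diagView mat = (List.range (2*mat.length-1)).flatMap (pvG mat) := by
  unfold diagView
  rw [PySem.List.pyRange_one]
  simp only [zero_add]
  have hcnt : ((2*(mat.length : Int)-1) - 0).toNat = 2*mat.length-1 := by omega
  rw [hcnt, List.foldl_map]
  rw [show (List.range (2*mat.length-1)).flatMap (pvG mat)
      = [] ++ (List.range (2*mat.length-1)).flatMap (pvG mat) from (List.nil_append _).symm]
  apply pv_foldl_flatMap
  intro acc d hd
  exact pv_diag_step mat hpre d (List.mem_range.mp hd) acc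

-- ===== VERDICT (by name: the statement is the Claim_ definition above) =====
theorem diagView_spec : Claim_equal_diagView := by
  intro mat _ hpre
  unfold Spec_diagView
  rw [pv_a_canon mat hpre, pv_alt_canon mat]
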